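-- pv_equiv track=rewrite | github.com/klark142/Introduction_to_Computer_Science | Kolokwia/2021_2.py | solve
-- ===== SOURCE A (Python) =====
-- def base_4(num):
--     res = 0
--     mult = 1
--     while num > 0:
--         res += (num % 4) * mult
--         num //= 4
--         mult *= 10
--     return res
--
-- def zbior_cyfr(a, b):
--     t_a = [0 for _ in range(10)]
--     t_b = [0 for _ in range(10)]
--     while a > 0:
--         last = a % 10
--         if t_a[last] != 1:
--             t_a[last] += 1
--         a //= 10
--     while b > 0:
--         last = b % 10
--         if t_b[last] != 1:
--             t_b[last] += 1
--         b //= 10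
--     for i in range(len(t_a)):
--         if t_a[i] != t_b[i]:
--             return False
--     return True
--
-- def zgodne_4(a, b):
--     return zbior_cyfr((base_4(a)), base_4(b))
--
-- def solve(t):
--     curr_highest = 0
--     highest = 0
--     for i in range(len(t)):
--         curr_highest = 0
--         for j in range(len(t)):
--             if zgodne_4(t[i], t[j]) and i != j:
--                 curr_highest += 1
--         if curr_highest > highest:
--             highest = curr_highest
--     if highest == 0:
--         return highest
--     if highest > 0:
--         return highest + 1
-- ===== SOURCE B (Python) =====
-- def solve(t):
--     # one grouping pass: canonical key = sorted tuple of distinct base-4 digits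
--     counts = {}
--     for x in t:
--         num = x
--         digits = set()
--         while num > 0:
--             digits.add(num % 4)
--             num //= 4
--         k = tuple(sorted(digits))
--         counts[k] = counts.get(k, 0) + 1
--     g = max(counts.values(), default=0)
--     return g if g >= 2 else 0
-- ===== Notes on version B (the rewrite author's own statement) =====
-- stated objective: faster
-- what changed: A compares every pair (i,j) by rebuilding decimal-digit indicator tables of base-4 encodings; B computes one canonical key per element (sorted tuple of distinct base-4 digits), counts groups in a single dict pass, and returns the largest group size (0 if below 2).
import Mathlib
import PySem

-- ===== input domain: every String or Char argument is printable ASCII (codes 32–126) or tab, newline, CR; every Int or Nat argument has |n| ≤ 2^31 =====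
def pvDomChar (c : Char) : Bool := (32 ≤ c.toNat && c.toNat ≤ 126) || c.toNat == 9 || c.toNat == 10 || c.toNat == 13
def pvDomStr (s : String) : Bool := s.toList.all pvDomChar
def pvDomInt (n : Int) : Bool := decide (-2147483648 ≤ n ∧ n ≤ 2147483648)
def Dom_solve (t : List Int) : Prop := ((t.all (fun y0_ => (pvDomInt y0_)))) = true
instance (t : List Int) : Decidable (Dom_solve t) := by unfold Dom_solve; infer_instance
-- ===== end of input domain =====

-- B replaces A's O(n^2) pairwise base-4-digit-set comparisons by a single grouping pass
-- keyed on the sorted list of distinct base-4 digits, then takes the largest group size.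


-- termination helpers for the 'while num > 0: num //= k' loops
theorem pvFd4_lt (num : Int) (h : 0 < num) : (PySem.Int.floordiv num 4).toNat < num.toNat := by
  rw [PySem.Int.floordiv_eq_ediv_of_pos (by norm_num)]; omega

theorem pvFd10_lt (a : Int) (h : 0 < a) : (PySem.Int.floordiv a 10).toNat < a.toNat := by
  rw [PySem.Int.floordiv_eq_ediv_of_pos (by norm_num)]; omega

-- ===== PORT A =====
def base4Loop (num res mult : Int) : Int :=
  if h : 0 < num then
    base4Loop (PySem.Int.floordiv num 4) (res + PySem.Int.mod num 4 * mult) (mult * 10)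
  else res
termination_by num.toNat
decreasing_by exact pvFd4_lt num h

def base_4 (num : Int) : Int := base4Loop num 0 1

-- the 'while a > 0' digit-marking loop of zbior_cyfr (read/write at index a % 10 via the total py ops)
def zbMark (a : Int) (t : List Int) : List Int :=
  if h : 0 < a then
    let last := PySem.Int.mod a 10
    let v := PySem.List.pyGetD t last 0
    zbMark (PySem.Int.floordiv a 10) (if v ≠ 1 then PySem.List.pySetD t last (v + 1) else t)
  else t
termination_by a.toNat
decreasing_by exact pvFd10_lt a h

-- the 'for i in range(len(t_a))' comparison loop with its early 'return False'
def zbCmp (ta tb : List Int) : List Int → Bool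
  | [] => true
  | i :: rest =>
    if PySem.List.pyGetD ta i 0 ≠ PySem.List.pyGetD tb i 0 then false else zbCmp ta tb rest

def zbior_cyfr (a b : Int) : Bool :=
  let ta := zbMark a (List.replicate 10 0)
  let tb := zbMark b (List.replicate 10 0)
  zbCmp ta tb (PySem.List.pyRange 0 (PySem.List.len ta) 1)

def zgodne_4 (a b : Int) : Bool := zbior_cyfr (base_4 a) (base_4 b)

def solve (t : List Int) : Int :=
  let n : Int := PySem.List.len t
  let highest := (PySem.List.pyRange 0 n 1).foldl (fun highest i =>
    let curr := (PySem.List.pyRange 0 n 1).foldl (fun curr j =>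
      if zgodne_4 (PySem.List.pyGetD t i 0) (PySem.List.pyGetD t j 0) && !(i == j)
      then curr + 1 else curr) 0
    if curr > highest then curr else highest) 0
  -- Python's trailing 'if highest > 0: return highest + 1' is the only other reachable case: highest ≥ 0 throughout
  if highest == 0 then highest else highest + 1

-- ===== PORT B =====
-- 'while num > 0: digits.add(num % 4); num //= 4'
def digitsLoop (num : Int) (s : PySem.Set Int) : PySem.Set Int :=
  if h : 0 < num then digitsLoop (PySem.Int.floordiv num 4) (PySem.Set.add s (PySem.Int.mod num 4))
  else s
termination_by num.toNat
decreasing_by exact pvFd4_lt num h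

def solve_alt (t : List Int) : Int :=
  let counts := t.foldl (fun counts x =>
    let k := PySem.List.sorted (digitsLoop x PySem.Set.empty) (fun v => v) false
    -- counts[k] = counts.get(k, 0) + 1
    PySem.Dict.modify counts k 0 (fun c => c + 1)) PySem.Dict.empty
  let g := (PySem.List.max? (PySem.Dict.values counts) (fun v => v)).getD 0
  if g ≥ 2 then g else 0

-- ===== PRECONDITION & SPEC =====
def Spec_solve (t : List Int) (out : Int) : Prop := out = solve_alt t
instance (t : List Int) (out : Int) : Decidable (Spec_solve t out) := by unfold Spec_solve; infer_instance

-- ===== CLAIM (what is proved, stated in full; the proofs are below) =====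
def Claim_equal_solve : Prop := ∀ (t : List Int), Dom_solve t → Spec_solve t (solve t)

-- ===== LEMMAS AND PROOFS =====
-- decimal value whose digits are num's base-4 digits (recursion form of base4Loop)
def b4 (num : Int) : Int :=
  if h : 0 < num then PySem.Int.mod num 4 + 10 * b4 (PySem.Int.floordiv num 4) else 0
termination_by num.toNat
decreasing_by exact pvFd4_lt num h

-- 'decimal digit d occurs in a'
def hd (a d : Int) : Bool :=
  if h : 0 < a then (PySem.Int.mod a 10 == d) || hd (PySem.Int.floordiv a 10) d else false
termination_by a.toNat
decreasing_by exact pvFd10_lt a h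

-- 'base-4 digit d occurs in x'
def d4 (x d : Int) : Bool :=
  if h : 0 < x then (PySem.Int.mod x 4 == d) || d4 (PySem.Int.floordiv x 4) d else false
termination_by x.toNat
decreasing_by exact pvFd4_lt x h

def pvKey (x : Int) : List Int :=
  PySem.List.sorted (digitsLoop x PySem.Set.empty) (fun v => v) false

theorem base4Loop_eq (num : Int) : ∀ res mult, base4Loop num res mult = res + mult * b4 num := by
  induction num using b4.induct with
  | case1 num h ih =>
    intro res mult
    rw [base4Loop, b4]; simp only [dif_pos h]; rw [ih]; ring
  | case2 num h =>
    intro res mult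
    rw [base4Loop, b4]; simp only [dif_neg h]; ring

theorem b4_nonneg (num : Int) : 0 ≤ b4 num := by
  induction num using b4.induct with
  | case1 num h ih =>
    rw [b4]; simp only [dif_pos h]
    have := PySem.Int.mod_eq_emod_of_pos (a := num) (b := 4) (by norm_num)
    omega
  | case2 num h =>
    rw [b4]; simp only [dif_neg h]
    norm_num

theorem b4_pos (num : Int) (hn : 0 < num) : 0 < b4 num := by
  induction num using b4.induct with
  | case1 num h ih =>
    rw [b4]; simp only [dif_pos h]
    have hm := PySem.Int.mod_eq_emod_of_pos (a := num) (b := 4) (by norm_num)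
    have hf := PySem.Int.floordiv_eq_ediv_of_pos (a := num) (b := 4) (by norm_num)
    have hb := b4_nonneg (PySem.Int.floordiv num 4)
    by_cases hq : 0 < PySem.Int.floordiv num 4
    · have := ih hq; omega
    · have : PySem.Int.mod num 4 = num := by omega
      omega
  | case2 num h => omega

theorem hd_b4 (x d : Int) : hd (b4 x) d = d4 x d := by
  induction x using d4.induct with
  | case1 x h ih =>
    have hb4pos : 0 < b4 x := b4_pos x h
    have hrec : b4 x = PySem.Int.mod x 4 + 10 * b4 (PySem.Int.floordiv x 4) := by
      conv_lhs => rw [b4]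
      simp only [dif_pos h]
    have hm4 := PySem.Int.mod_eq_emod_of_pos (a := x) (b := 4) (by norm_num)
    have hrn := b4_nonneg (PySem.Int.floordiv x 4)
    have hmod10 : PySem.Int.mod (b4 x) 10 = PySem.Int.mod x 4 := by
      rw [PySem.Int.mod_eq_emod_of_pos (by norm_num), hrec]; omega
    have hdiv10 : PySem.Int.floordiv (b4 x) 10 = b4 (PySem.Int.floordiv x 4) := by
      rw [PySem.Int.floordiv_eq_ediv_of_pos (by norm_num), hrec]; omega
    conv_lhs => rw [hd]
    simp only [dif_pos hb4pos]
    rw [hmod10, hdiv10, ih]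
    conv_rhs => rw [d4]
    simp only [dif_pos h]
  | case2 x h =>
    have hb : b4 x = 0 := by rw [b4]; simp only [dif_neg h]
    rw [hb, hd, d4]
    simp only [dif_neg h]
    norm_num

theorem d4_lt (x d : Int) (h : d4 x d = true) : 0 ≤ d ∧ d < 4 := by
  induction x using d4.induct with
  | case1 x hx ih =>
    rw [d4] at h
    simp only [dif_pos hx, Bool.or_eq_true, beq_iff_eq] at h
    rcases h with h | h
    · have := PySem.Int.mod_eq_emod_of_pos (a := x) (b := 4) (by norm_num)
      omega
    · exact ih h
  | case2 x hx =>
    rw [d4] at h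
    simp only [dif_neg hx] at h
    exact absurd h (by simp)
theorem zbMark_spec (a : Int) : ∀ t : List Int, t.length = 10 → (∀ v ∈ t, v = 0 ∨ v = 1) →
    (zbMark a t).length = 10 ∧ (∀ v ∈ zbMark a t, v = 0 ∨ v = 1) ∧
    ∀ d : Int, 0 ≤ d → d < 10 →
      PySem.List.pyGetD (zbMark a t) d 0 = (if hd a d then 1 else PySem.List.pyGetD t d 0) := by
  induction a using hd.induct with
  | case1 a h ih =>
    intro t hlen hvals
    have hmod := PySem.Int.mod_eq_emod_of_pos (a := a) (b := 10) (by norm_num)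
    have hlast0 : 0 ≤ PySem.Int.mod a 10 := by omega
    have hlast10 : PySem.Int.mod a 10 < 10 := by omega
    have hvget : PySem.List.pyGetD t (PySem.Int.mod a 10) 0 = t[(PySem.Int.mod a 10).toNat]'(by omega) :=
      PySem.List.pyGetD_eq_getElem _ _ hlast0 (by simp only [hlen]; omega)
    have hvmem : PySem.List.pyGetD t (PySem.Int.mod a 10) 0 ∈ t := by
      rw [hvget]; exact List.getElem_mem _
    have hv01 := hvals _ hvmem
    -- state of the table after the body of one iteration
    set T' := if PySem.List.pyGetD t (PySem.Int.mod a 10) 0 ≠ 1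
      then PySem.List.pySetD t (PySem.Int.mod a 10) (PySem.List.pyGetD t (PySem.Int.mod a 10) 0 + 1)
      else t with hT'
    have hT'len : T'.length = 10 := by
      rw [hT']; split_ifs with hif
      · rw [PySem.List.pySetD_of_nonneg _ _ hlast0]; simp [hlen]
      · exact hlen
    have hT'get : ∀ d : Int, 0 ≤ d → d < 10 →
        PySem.List.pyGetD T' d 0 = if d = PySem.Int.mod a 10 then 1 else PySem.List.pyGetD t d 0 := by
      intro d hd0 hd10
      rw [hT']; split_ifs with hif heq
      · -- wrote: entry was 0, becomes 1
        have hv0 : PySem.List.pyGetD t (PySem.Int.mod a 10) 0 = 0 := by rcases hv01 with h0 | h1 <;> [exact h0; exact absurd h1 hif]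
        subst heq
        rw [PySem.List.pySetD_of_nonneg _ _ hlast0,
          PySem.List.pyGetD_eq_getElem _ _ hd0 (by simp only [List.length_set, hlen]; omega)]
        rw [List.getElem_set_self]
        omega
      · rw [PySem.List.pySetD_of_nonneg _ _ hlast0,
          PySem.List.pyGetD_eq_getElem _ _ hd0 (by simp only [List.length_set, hlen]; omega),
          PySem.List.pyGetD_eq_getElem _ _ hd0 (by simp only [hlen]; omega)]
        rw [List.getElem_set]
        rw [if_neg (by omega)]
      · rename_i heq
        subst heq
        omega
      · rfl
    have hT'vals : ∀ v ∈ T', v = 0 ∨ v = 1 := by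
      rw [hT']; split_ifs with hif
      · rw [PySem.List.pySetD_of_nonneg _ _ hlast0]
        intro w hw
        rcases List.mem_or_eq_of_mem_set hw with hw | hw
        · exact hvals _ hw
        · right; rcases hv01 with h0 | h1 <;> omega
      · exact hvals
    obtain ⟨hrl, hrv, hrg⟩ := ih T' hT'len hT'vals
    rw [zbMark]
    simp only [dif_pos h]
    refine ⟨hrl, hrv, ?_⟩
    intro d hd0 hd10
    rw [hrg d hd0 hd10, hT'get d hd0 hd10]
    conv_rhs => rw [hd]
    simp only [dif_pos h]
    by_cases hcase : hd (PySem.Int.floordiv a 10) d = true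
    · rw [if_pos hcase, hcase, Bool.or_true, if_pos rfl]
    · have hc' : hd (PySem.Int.floordiv a 10) d = false := by simpa using hcase
      rw [if_neg hcase, hc', Bool.or_false]
      by_cases hde : d = PySem.Int.mod a 10
      · rw [if_pos hde, if_pos (show (PySem.Int.mod a 10 == d) = true by simp [beq_iff_eq, hde])]
      · rw [if_neg hde, if_neg (show ¬ (PySem.Int.mod a 10 == d) = true by simp [beq_iff_eq]; omega)]
  | case2 a h =>
    intro t hlen hvals
    rw [zbMark]
    simp only [dif_neg h]
    refine ⟨hlen, hvals, ?_⟩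
    intro d hd0 hd10
    rw [hd]
    simp only [dif_neg h]
    norm_num
theorem zbCmp_all (ta tb : List Int) :
    ∀ l, zbCmp ta tb l = l.all (fun i => PySem.List.pyGetD ta i 0 == PySem.List.pyGetD tb i 0) := by
  intro l
  induction l with
  | nil => rfl
  | cons i rest ih =>
    rw [zbCmp, List.all_cons]
    split_ifs with hne
    · have : (PySem.List.pyGetD ta i 0 == PySem.List.pyGetD tb i 0) = false := by
        simp [hne]
      rw [this, Bool.false_and]
    · have : (PySem.List.pyGetD ta i 0 == PySem.List.pyGetD tb i 0) = true := by
        simp at hne; simp [beq_iff_eq, hne]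
      rw [this, Bool.true_and, ih]

theorem zbior_iff (a b : Int) :
    zbior_cyfr a b = true ↔ ∀ d : Int, 0 ≤ d → d < 10 → hd a d = hd b d := by
  have hrep_len : (List.replicate 10 (0 : Int)).length = 10 := by simp
  have hrep_vals : ∀ v ∈ List.replicate 10 (0 : Int), v = 0 ∨ v = 1 := by
    intro v hv; left; exact List.eq_of_mem_replicate hv
  obtain ⟨hla, hva, hga⟩ := zbMark_spec a _ hrep_len hrep_vals
  obtain ⟨hlb, hvb, hgb⟩ := zbMark_spec b _ hrep_len hrep_vals
  have hrep : ∀ d : Int, 0 ≤ d → d < 10 →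
      PySem.List.pyGetD (List.replicate 10 (0 : Int)) d 0 = 0 := by
    intro d h0 h1
    rw [PySem.List.pyGetD_eq_getElem _ _ h0 (by rw [hrep_len]; omega)]
    exact List.getElem_replicate _
  rw [zbior_cyfr, zbCmp_all, List.all_eq_true]
  have hlen10 : PySem.List.len (zbMark a (List.replicate 10 0)) = 10 := by
    rw [PySem.List.len_eq, hla]; norm_num
  rw [hlen10]
  constructor
  · intro hall d h0 h1
    have hm : d ∈ PySem.List.pyRange 0 10 := PySem.List.mem_pyRange_one.mpr ⟨h0, h1⟩
    have := hall d hm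
    rw [hga d h0 h1, hgb d h0 h1, hrep d h0 h1] at this
    rw [beq_iff_eq] at this
    cases hA : hd a d <;> cases hB : hd b d <;> simp [hA, hB] at this ⊢
  · intro heq d hm
    obtain ⟨h0, h1⟩ := PySem.List.mem_pyRange_one.mp hm
    rw [hga d h0 h1, hgb d h0 h1, hrep d h0 h1, heq d h0 h1, beq_iff_eq]

theorem digitsLoop_mem (num : Int) : ∀ s : PySem.Set Int, ∀ d : Int,
    d ∈ digitsLoop num s ↔ d ∈ s ∨ d4 num d = true := by
  induction num using d4.induct with
  | case1 x h ih =>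
    intro s d
    rw [digitsLoop]
    simp only [dif_pos h]
    rw [ih, PySem.Set.mem_add]
    conv_rhs => rw [d4]
    simp only [dif_pos h, Bool.or_eq_true, beq_iff_eq]
    constructor
    · rintro ((hs | he) | hr)
      · exact Or.inl hs
      · exact Or.inr (Or.inl he.symm)
      · exact Or.inr (Or.inr hr)
    · rintro (hs | he | hr)
      · exact Or.inl (Or.inl hs)
      · exact Or.inl (Or.inr he.symm)
      · exact Or.inr hr
  | case2 x h =>
    intro s d
    rw [digitsLoop, d4]
    simp only [dif_neg h]
    norm_num

theorem digitsLoop_nodup (num : Int) : ∀ s : PySem.Set Int, s.Nodup → (digitsLoop num s).Nodup := by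
  induction num using d4.induct with
  | case1 x h ih =>
    intro s hs
    rw [digitsLoop]
    simp only [dif_pos h]
    exact ih _ (PySem.Set.nodup_add s _ hs)
  | case2 x h =>
    intro s hs
    rw [digitsLoop]
    simp only [dif_neg h]
    exact hs

theorem pvKey_mem (x d : Int) : d ∈ pvKey x ↔ d4 x d = true := by
  rw [pvKey, PySem.List.mem_sorted, digitsLoop_mem]
  simp [PySem.Set.empty]

theorem pvKey_eq_iff (x y : Int) : pvKey x = pvKey y ↔ ∀ d : Int, d4 x d = d4 y d := by
  constructor
  · intro hk d
    have := pvKey_mem x d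
    rw [hk, pvKey_mem y d] at this
    cases hA : d4 x d <;> cases hB : d4 y d <;> simp [hA, hB] at this ⊢
  · intro hall
    rw [pvKey, pvKey]
    rw [PySem.List.sorted_id_eq_sorted_id_iff_perm]
    rw [List.perm_ext_iff_of_nodup (digitsLoop_nodup x _ (by simp [PySem.Set.empty]))
      (digitsLoop_nodup y _ (by simp [PySem.Set.empty]))]
    intro d
    rw [digitsLoop_mem, digitsLoop_mem]
    simp [PySem.Set.empty, hall d]

theorem base_4_eq (x : Int) : base_4 x = b4 x := by
  rw [base_4, base4Loop_eq]; ring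

theorem zgodne_eq (x y : Int) : zgodne_4 x y = (pvKey x == pvKey y) := by
  have hiff : zgodne_4 x y = true ↔ pvKey x = pvKey y := by
    rw [zgodne_4, base_4_eq, base_4_eq, zbior_iff, pvKey_eq_iff]
    constructor
    · intro hall d
      by_cases hb : 0 ≤ d ∧ d < 10
      · rw [← hd_b4, ← hd_b4]; exact hall d hb.1 hb.2
      · have hx : d4 x d = false := by
          cases hA : d4 x d
          · rfl
          · exact absurd (d4_lt x d hA) (by omega)
        have hy : d4 y d = false := by
          cases hA : d4 y d
          · rfl
          · exact absurd (d4_lt y d hA) (by omega)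
        rw [hx, hy]
    · intro hall d h0 h1
      rw [hd_b4, hd_b4]; exact hall d
  cases hz : zgodne_4 x y
  · rw [hz] at hiff
    have : ¬ pvKey x = pvKey y := by
      intro hc; exact absurd (hiff.mpr hc) (by simp)
    simp [beq_iff_eq, this]
  · rw [hz] at hiff
    simp [hiff.mp rfl]
theorem countP_and_ne {q : Int → Bool} {i : Int} :
    ∀ l : List Int, l.Nodup → i ∈ l → q i = true →
    l.countP q = l.countP (fun j => q j && !(i == j)) + 1 := by
  intro l
  induction l with
  | nil => intro _ h; simp at h
  | cons x rest ih =>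
    intro hnd hmem hqi
    have hnd' := List.nodup_cons.mp hnd
    rw [List.countP_cons, List.countP_cons]
    rcases List.mem_cons.mp hmem with hx | hx
    · subst hx
      have hni : i ∉ rest := hnd'.1
      have hcongr : rest.countP (fun j => q j && !(i == j)) = rest.countP q := by
        apply List.countP_congr
        intro j hj
        have hne : ¬ (i = j) := fun hc => hni (hc ▸ hj)
        simp [hne]
      rw [hqi, hcongr]
      simp
    · have hne : ¬ (i = x) := fun hc => by
        subst hc; exact hnd'.1 hx
      have hhead : (q x && !(i == x)) = q x := by simp [hne]
      rw [hhead, ih hnd'.2 hx hqi]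
      ring

-- the multiplicity of x's key among the keys of t
def pvCnt (t : List Int) (x : Int) : Int := ((t.map pvKey).count (pvKey x) : Int)

theorem pvCnt_pos (t : List Int) (x : Int) (hx : x ∈ t) : 1 ≤ pvCnt t x := by
  rw [pvCnt]
  have : pvKey x ∈ t.map pvKey := List.mem_map_of_mem hx
  have := List.count_pos_iff.mpr this
  omega

theorem inner_eq (t : List Int) (i : Int) (hi : i ∈ PySem.List.pyRange 0 (t.length : Int)) :
    ((PySem.List.pyRange 0 (t.length : Int)).foldl (fun curr j =>
      if (pvKey (PySem.List.pyGetD t i 0) == pvKey (PySem.List.pyGetD t j 0)) && !(i == j)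
      then curr + 1 else curr) 0 : Int) = pvCnt t (PySem.List.pyGetD t i 0) - 1 := by
  rw [PySem.List.foldl_if_add_one
    (fun j => (pvKey (PySem.List.pyGetD t i 0) == pvKey (PySem.List.pyGetD t j 0)) && !(i == j))]
  have hq : (fun j => (pvKey (PySem.List.pyGetD t i 0) == pvKey (PySem.List.pyGetD t j 0))) i = true := by
    simp
  have hcount := countP_and_ne (q := fun j => (pvKey (PySem.List.pyGetD t i 0) == pvKey (PySem.List.pyGetD t j 0)))
    (i := i) (PySem.List.pyRange 0 (t.length : Int)) (PySem.List.nodup_pyRange_one 0 _) hi hq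
  beta_reduce at hcount
  have hmap : (PySem.List.pyRange 0 (t.length : Int)).countP
      (fun j => (pvKey (PySem.List.pyGetD t i 0) == pvKey (PySem.List.pyGetD t j 0)))
      = pvCnt t (PySem.List.pyGetD t i 0) := by
    have hcomp : (PySem.List.pyRange 0 (t.length : Int)).countP
        (fun j => pvKey (PySem.List.pyGetD t i 0) == pvKey (PySem.List.pyGetD t j 0))
        = t.countP (fun x => pvKey (PySem.List.pyGetD t i 0) == pvKey x) := by
      have hm := List.countP_map (p := fun x => pvKey (PySem.List.pyGetD t i 0) == pvKey x)
        (f := fun j => PySem.List.pyGetD t j 0) (l := PySem.List.pyRange 0 (t.length : Int))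
      rw [PySem.List.map_pyGetD_pyRange_zero'] at hm
      exact hm.symm
    have h2 : (t.map pvKey).count (pvKey (PySem.List.pyGetD t i 0))
        = t.countP (fun x => pvKey (PySem.List.pyGetD t i 0) == pvKey x) := by
      rw [List.count, List.countP_map]
      apply List.countP_congr
      intro x hx
      simp only [Function.comp, beq_iff_eq]
      exact ⟨fun h => h.symm, fun h => h.symm⟩
    rw [pvCnt]
    congr 1
    rw [h2, hcomp]
  omega

theorem foldl_max_sub {α : Type} (l : List α) (f : α → Int) : ∀ a : Int,
    l.foldl (fun h x => max h (f x - 1)) (a - 1) = l.foldl (fun h x => max h (f x)) a - 1 := by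
  induction l with
  | nil => intro a; simp
  | cons x rest ih =>
    intro a
    rw [List.foldl_cons, List.foldl_cons]
    have : max (a - 1) (f x - 1) = max a (f x) - 1 := by omega
    rw [this, ih]
theorem solve_eq (t : List Int) :
    solve t = (if t.foldl (fun h x => max h (pvCnt t x - 1)) 0 = 0
      then t.foldl (fun h x => max h (pvCnt t x - 1)) 0
      else t.foldl (fun h x => max h (pvCnt t x - 1)) 0 + 1) := by
  rw [solve]
  simp only [PySem.List.len_eq]
  have hcong : ∀ i ∈ PySem.List.pyRange 0 (t.length : Int), ∀ acc : Int,
      (fun highest i =>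
        let curr := (PySem.List.pyRange 0 (t.length : Int)).foldl (fun curr j =>
          if zgodne_4 (PySem.List.pyGetD t i 0) (PySem.List.pyGetD t j 0) && !(i == j)
          then curr + 1 else curr) 0
        if curr > highest then curr else highest) acc i
      = max acc (pvCnt t (PySem.List.pyGetD t i 0) - 1) := by
    intro i hi acc
    dsimp only
    simp only [zgodne_eq]
    rw [inner_eq t i hi]
    omega
  rw [PySem.List.foldl_congr_mem' (PySem.List.pyRange 0 (t.length : Int)) _
    (fun acc i => max acc (pvCnt t (PySem.List.pyGetD t i 0) - 1)) 0 hcong]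
  rw [PySem.List.foldl_pyRange_zero_pyGetD' t 0 (fun h x => max h (pvCnt t x - 1)) 0]
  by_cases h0 : t.foldl (fun h x => max h (pvCnt t x - 1)) 0 = 0
  · rw [if_pos (by simpa [beq_iff_eq] using h0), if_pos h0]
  · rw [if_neg (by simpa [beq_iff_eq] using h0), if_neg h0]

theorem alt_eq (t : List Int) :
    solve_alt t = (if 2 ≤ (PySem.List.max?
        ((PySem.Set.ofList (t.map pvKey)).map (fun k => ((t.map pvKey).count k : Int)))
        (fun v => v)).getD 0
      then (PySem.List.max?
        ((PySem.Set.ofList (t.map pvKey)).map (fun k => ((t.map pvKey).count k : Int)))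
        (fun v => v)).getD 0
      else 0) := by
  rw [solve_alt]
  have hfold : t.foldl (fun counts x => PySem.Dict.modify counts
        (PySem.List.sorted (digitsLoop x PySem.Set.empty) (fun v => v) false) 0 (fun c => c + 1))
        PySem.Dict.empty
      = PySem.Dict.counter (t.map pvKey) := by
    rw [PySem.Dict.counter_eq_foldl, List.foldl_map]
    rfl
  rw [hfold]
  have hvals : PySem.Dict.values (PySem.Dict.counter (t.map pvKey))
      = (PySem.Set.ofList (t.map pvKey)).map (fun k => ((t.map pvKey).count k : Int)) := by
    show (PySem.Dict.counter (t.map pvKey)).items.map (·.2) = _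
    rw [PySem.Dict.items_counter, List.map_map]
    rfl
  rw [hvals]
theorem solve_eq_alt (t : List Int) : solve t = solve_alt t := by
  rcases t with _ | ⟨x, rest⟩
  · rfl
  · rw [solve_eq, alt_eq]
    have hH : (x :: rest).foldl (fun h y => max h (pvCnt (x :: rest) y - 1)) 0
        = (x :: rest).foldl (fun h y => max h (pvCnt (x :: rest) y)) 1 - 1 := by
      have := foldl_max_sub (x :: rest) (pvCnt (x :: rest)) 1
      norm_num at this
      exact this
    have hMabs : (x :: rest).foldl (fun h y => max h (pvCnt (x :: rest) y)) 1
        = ((x :: rest).map (pvCnt (x :: rest))).foldl max 1 := by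
      rw [List.foldl_map]
    have hub : ∀ y ∈ (x :: rest), pvCnt (x :: rest) y
        ≤ (x :: rest).foldl (fun h y => max h (pvCnt (x :: rest) y)) 1 := by
      intro y hy
      rw [hMabs]
      exact (PySem.List.le_foldl_max _ 1).2 _ (List.mem_map_of_mem hy)
    have hM1 : 1 ≤ (x :: rest).foldl (fun h y => max h (pvCnt (x :: rest) y)) 1 := by
      rw [hMabs]; exact (PySem.List.le_foldl_max _ 1).1
    have hMmem : (x :: rest).foldl (fun h y => max h (pvCnt (x :: rest) y)) 1 = 1
        ∨ (x :: rest).foldl (fun h y => max h (pvCnt (x :: rest) y)) 1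
          ∈ (x :: rest).map (pvCnt (x :: rest)) := by
      rw [hMabs]; exact PySem.List.foldl_max_mem _ 1
    -- the dict-values side
    have hkmem : pvKey x ∈ PySem.Set.ofList ((x :: rest).map pvKey) := by
      rw [PySem.Set.mem_ofList]
      exact List.mem_map_of_mem List.mem_cons_self
    have hvmem : pvCnt (x :: rest) x ∈ (PySem.Set.ofList ((x :: rest).map pvKey)).map
        (fun k => (((x :: rest).map pvKey).count k : Int)) :=
      List.mem_map_of_mem hkmem
    obtain ⟨m, hm⟩ : ∃ m, PySem.List.max? ((PySem.Set.ofList ((x :: rest).map pvKey)).map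
        (fun k => (((x :: rest).map pvKey).count k : Int))) (fun v => v) = some m := by
      cases hcase : PySem.List.max? ((PySem.Set.ofList ((x :: rest).map pvKey)).map
        (fun k => (((x :: rest).map pvKey).count k : Int))) (fun v => v) with
      | none =>
        rw [PySem.List.max?_eq_none_iff] at hcase
        rw [hcase] at hvmem
        simp at hvmem
      | some m => exact ⟨m, rfl⟩
    have hmax := PySem.List.max?_isMax hm
    have hmem := PySem.List.max?_mem hm
    obtain ⟨k0, hk0, hk0m⟩ := List.mem_map.mp hmem
    rw [PySem.Set.mem_ofList] at hk0
    obtain ⟨y0, hy0, hy0k⟩ := List.mem_map.mp hk0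
    have hmy0 : m = pvCnt (x :: rest) y0 := by rw [pvCnt, hy0k, hk0m]
    have hmub : ∀ y ∈ (x :: rest), pvCnt (x :: rest) y ≤ m := by
      intro y hy
      refine hmax _ ?_
      refine List.mem_map_of_mem ?_
      rw [PySem.Set.mem_ofList]
      exact List.mem_map_of_mem hy
    have hMm : (x :: rest).foldl (fun h y => max h (pvCnt (x :: rest) y)) 1 = m := by
      apply le_antisymm
      · rcases hMmem with h1 | h2
        · rw [h1, hmy0]
          exact pvCnt_pos _ _ hy0
        · obtain ⟨z, hz, hzm⟩ := List.mem_map.mp h2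
          rw [← hzm]
          exact hmub z hz
      · rw [hmy0]
        exact hub y0 hy0
    rw [hH, hMm, hm]
    simp only [Option.getD_some]
    split_ifs <;> omega

-- ===== VERDICT (by name: the statement is the Claim_ definition above) =====
theorem solve_spec : Claim_equal_solve := by
  intro t _hdom
  show solve t = solve_alt t
  exact solve_eq_alt t
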